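-- pv_equiv track=rewrite | github.com/Dixith-ai/Learning-Python | _staging/advanced/find_all_combinations.py | find_combinations_with_advanced_optimization_enhanced
-- ===== SOURCE A (Python) =====
-- def find_combinations_with_advanced_optimization_enhanced(arr, k):
--     def backtrack(start, current):
--         if len(current) == k:
--             result.append(current[:])
--             return
--
--         for i in range(start, len(arr)):
--             current.append(arr[i])
--             backtrack(i + 1, current)
--             current.pop()
--
--     result = []
--     backtrack(0, [])
--     return result
-- ===== SOURCE B (Python) =====
-- def find_combinations_with_advanced_optimization_enhanced(arr, k):
--     # DP over suffixes: table[j] = all j-combinations of the suffix processed so far,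
--     # in index-lexicographic order; iterate elements right-to-left, no recursion.
--     if k < 0 or k > len(arr):
--         return []
--     table = [[[]]] + [[] for _ in range(k)]
--     for x in reversed(arr):
--         table = [[[]]] + [[[x] + c for c in prev] + cur
--                           for prev, cur in zip(table, table[1:])]
--     return table[k]
-- ===== Notes on version B (the rewrite author's own statement) =====
-- stated objective: alternative
-- what changed: B replaces A's recursive index backtracking (mutable current list, choose-then-pop loop) with an iterative right-to-left dynamic-programming pass maintaining a table whose j-th entry is all j-combinations of the suffix processed so far, returning table[k].
import Mathlib
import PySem

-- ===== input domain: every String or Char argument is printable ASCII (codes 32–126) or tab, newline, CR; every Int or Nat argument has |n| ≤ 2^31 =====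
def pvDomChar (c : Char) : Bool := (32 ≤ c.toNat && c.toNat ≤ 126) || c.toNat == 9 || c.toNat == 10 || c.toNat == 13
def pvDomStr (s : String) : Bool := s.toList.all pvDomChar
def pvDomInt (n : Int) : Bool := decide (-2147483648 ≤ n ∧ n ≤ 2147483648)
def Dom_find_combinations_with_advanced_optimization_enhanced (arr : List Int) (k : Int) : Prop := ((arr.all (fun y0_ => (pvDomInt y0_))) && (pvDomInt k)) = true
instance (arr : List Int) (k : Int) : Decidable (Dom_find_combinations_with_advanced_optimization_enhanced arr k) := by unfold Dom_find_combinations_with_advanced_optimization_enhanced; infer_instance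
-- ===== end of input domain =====

-- B replaces A's recursive index backtracking by a right-to-left DP pass that maintains,
-- for each j ≤ k, the list of all j-combinations of the suffix seen so far ("alternative").

-- ===== PORT A =====
-- backtrack(start, current): the for-loop concatenates, in order, the results of the
-- recursive calls; arr.getD i 0 is exact since i < arr.length for every i produced here.
def pvBacktrack (arr : List Int) (k : Int) (start : Nat) (cur : List Int) : List (List Int) :=
  if (cur.length : Int) = k then [cur]
  else
    (List.range' start (arr.length - start)).attach.flatMap
      (fun x => pvBacktrack arr k (x.1 + 1) (cur ++ [arr.getD x.1 0]))
termination_by arr.length - start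
decreasing_by
  have h := List.mem_range'_1.mp x.2
  omega

def find_combinations_with_advanced_optimization_enhanced (arr : List Int) (k : Int) : List (List Int) :=
  pvBacktrack arr k 0 []

-- ===== PORT B =====
-- one DP step: new table[0] = [[]]; new table[j] = map (x :: ·) table[j-1] ++ table[j]
def pvStep (x : Int) (t : List (List (List Int))) : List (List (List Int)) :=
  [[]] :: List.zipWith (fun prev cur => prev.map (fun c => x :: c) ++ cur) t t.tail

def find_combinations_with_advanced_optimization_enhanced_alt (arr : List Int) (k : Int) : List (List Int) :=
  if k < 0 ∨ (arr.length : Int) < k then []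
  else (arr.foldr pvStep ([[]] :: List.replicate k.toNat [])).getD k.toNat []

-- ===== PRECONDITION & SPEC =====
def Spec_find_combinations_with_advanced_optimization_enhanced (arr : List Int) (k : Int) (out : List (List Int)) : Prop := out = find_combinations_with_advanced_optimization_enhanced_alt arr k
instance (arr : List Int) (k : Int) (out : List (List Int)) : Decidable (Spec_find_combinations_with_advanced_optimization_enhanced arr k out) := by unfold Spec_find_combinations_with_advanced_optimization_enhanced; infer_instance

-- ===== CLAIM (what is proved, stated in full; the proofs are below) =====
def Claim_equal_find_combinations_with_advanced_optimization_enhanced : Prop := ∀ (arr : List Int) (k : Int), Dom_find_combinations_with_advanced_optimization_enhanced arr k → Spec_find_combinations_with_advanced_optimization_enhanced arr k (find_combinations_with_advanced_optimization_enhanced arr k)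

-- ===== LEMMAS AND PROOFS =====

-- mathematical reference: all j-combinations of a list, in index-lexicographic order
def comb : Nat → List Int → List (List Int)
  | 0, _ => [[]]
  | _ + 1, [] => []
  | j + 1, x :: xs => (comb j xs).map (fun c => x :: c) ++ comb (j + 1) xs

lemma comb_nil (j : Nat) : comb j ([] : List Int) = if j = 0 then [[]] else [] := by
  cases j <;> simp [comb]

lemma init_eq (K : Nat) :
    ([[]] :: List.replicate K ([] : List (List Int))) =
      (List.range (K + 1)).map (fun j => comb j ([] : List Int)) := by
  apply List.ext_getElem
  · simp
  · intro i h1 h2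
    simp only [List.getElem_map, List.getElem_range, comb_nil]
    cases i with
    | zero => simp
    | succ m => simp

lemma zip_map_range' (f : List (List Int) → List (List Int) → List (List Int))
    (g : Nat → List (List Int)) :
    ∀ (n s : Nat),
      List.zipWith f ((List.range' s (n + 1)).map g) (((List.range' s (n + 1)).map g).tail)
        = (List.range' s n).map (fun j => f (g j) (g (j + 1))) := by
  intro n
  induction n with
  | zero => intro s; simp [List.range'_succ]
  | succ m ih =>
      intro s
      have e1 : List.range' s (m + 2) = s :: List.range' (s + 1) (m + 1) := List.range'_succ
      have e2 : List.range' (s + 1) (m + 1) = (s + 1) :: List.range' (s + 2) m := List.range'_succ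
      have e3 : List.range' s (m + 1) = s :: List.range' (s + 1) m := List.range'_succ
      rw [e1, List.map_cons, List.tail_cons, e3, List.map_cons, ← ih (s + 1)]
      conv_lhs => rw [e2, List.map_cons, List.zipWith_cons_cons]
      rw [e2, List.map_cons, List.tail_cons]

lemma step_eq (x : Int) (xs : List Int) (K : Nat) :
    pvStep x ((List.range (K + 1)).map (fun j => comb j xs))
      = (List.range (K + 1)).map (fun j => comb j (x :: xs)) := by
  unfold pvStep
  rw [List.range_eq_range', zip_map_range']
  have e : List.range' 0 (K + 1) = 0 :: List.range' 1 K := List.range'_succ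
  have hshift : ∀ m s : Nat, (List.range' s m).map (fun j => comb (j + 1) (x :: xs))
      = (List.range' (s + 1) m).map (fun j => comb j (x :: xs)) := by
    intro m
    induction m with
    | zero => intro s; simp
    | succ p ih => intro s; rw [List.range'_succ, List.range'_succ]; simp [ih (s + 1)]
  rw [e, List.map_cons]
  congr 1
  rw [← hshift K 0]
  apply List.map_congr_left
  intro j _
  simp [comb]

lemma fold_eq (K : Nat) :
    ∀ l : List Int,
      l.foldr pvStep ([[]] :: List.replicate K ([] : List (List Int)))
        = (List.range (K + 1)).map (fun j => comb j l) := by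
  intro l
  induction l with
  | nil => exact init_eq K
  | cons x xs ih => simp only [List.foldr_cons, ih, step_eq]

lemma comb_of_length_lt : ∀ (l : List Int) (j : Nat), l.length < j → comb j l = [] := by
  intro l
  induction l with
  | nil => intro j h; cases j with | zero => omega | succ m => rfl
  | cons x xs ih =>
      intro j h
      cases j with
      | zero => omega
      | succ m =>
          simp only [List.length_cons] at h
          simp [comb, ih m (by omega), ih (m + 1) (by omega)]

lemma alt_eq (arr : List Int) (k : Int) (hk : 0 ≤ k) :
    find_combinations_with_advanced_optimization_enhanced_alt arr k = comb k.toNat arr := by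
  unfold find_combinations_with_advanced_optimization_enhanced_alt
  by_cases hn : (arr.length : Int) < k
  · rw [if_pos (Or.inr hn), comb_of_length_lt arr k.toNat (by omega)]
  · rw [if_neg (by omega), fold_eq]
    have h : k.toNat < ((List.range (k.toNat + 1)).map (fun j => comb j arr)).length := by simp
    rw [List.getD_eq_getElem _ _ h]
    simp

lemma comb_drop (arr : List Int) (j : Nat) :
    ∀ (d start : Nat), arr.length - start = d →
      comb (j + 1) (arr.drop start)
        = (List.range' start (arr.length - start)).flatMap
            (fun i => (comb j (arr.drop (i + 1))).map (fun c => arr.getD i 0 :: c)) := by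
  intro d
  induction d with
  | zero =>
      intro start h
      have hs : arr.length ≤ start := by omega
      rw [h, List.drop_of_length_le hs, comb_nil, if_neg (by omega), List.range'_zero,
        List.flatMap_nil]
  | succ m ih =>
      intro start h
      have hs : start < arr.length := by omega
      have hdrop : arr.drop start = arr[start] :: arr.drop (start + 1) :=
        List.drop_eq_getElem_cons hs
      rw [h, List.range'_succ, List.flatMap_cons, hdrop]
      show (comb j (arr.drop (start+1))).map (fun c => arr[start] :: c) ++ _ = _
      have hget : arr.getD start 0 = arr[start] := List.getD_eq_getElem _ _ hs
      rw [hget]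
      congr 1
      have h2 : arr.length - (start + 1) = m := by omega
      rw [ih (start + 1) h2, h2]

lemma flatMap_attach_out {α β : Type} (l : List α) (f : α → List β) :
    l.attach.flatMap (fun x => f x.1) = l.flatMap f := by
  conv_rhs => rw [← List.attach_map_subtype_val l]
  rw [List.flatMap_map]

lemma backtrack_neg (arr : List Int) (k : Int) (hk : k < 0) :
    ∀ (d start : Nat) (cur : List Int), arr.length - start ≤ d →
      pvBacktrack arr k start cur = [] := by
  intro d
  induction d with
  | zero =>
      intro start cur h
      rw [pvBacktrack, if_neg (by omega)]
      have : arr.length - start = 0 := by omega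
      rw [this]; simp
  | succ m ih =>
      intro start cur h
      rw [pvBacktrack, if_neg (by omega)]
      rw [List.flatMap_eq_nil_iff]
      intro x hx
      have hmem := List.mem_range'_1.mp x.2
      exact ih (x.1 + 1) _ (by omega)
  
lemma backtrack_eq (arr : List Int) (k : Int) (hk : 0 ≤ k) :
    ∀ (j : Nat) (start : Nat) (cur : List Int), cur.length + j = k.toNat →
      pvBacktrack arr k start cur = (comb j (arr.drop start)).map (fun c => cur ++ c) := by
  intro j
  induction j with
  | zero =>
      intro start cur h
      rw [pvBacktrack, if_pos (by omega)]
      simp [comb]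
  | succ m ih =>
      intro start cur h
      rw [pvBacktrack, if_neg (by omega)]
      rw [comb_drop arr m (arr.length - start) start rfl, List.map_flatMap]
      conv_rhs => rw [← flatMap_attach_out (List.range' start (arr.length - start))
        (fun i => List.map (fun c => cur ++ c)
          (List.map (fun c => arr.getD i 0 :: c) (comb m (List.drop (i + 1) arr))))]
      congr 1
      funext x
      rw [ih (x.1 + 1) (cur ++ [arr.getD x.1 0]) (by simp; omega)]
      simp [List.map_map, Function.comp]

-- ===== VERDICT (by name: the statement is the Claim_ definition above) =====
theorem find_combinations_with_advanced_optimization_enhanced_spec : Claim_equal_find_combinations_with_advanced_optimization_enhanced := by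
  intro arr k _
  unfold Spec_find_combinations_with_advanced_optimization_enhanced
  unfold find_combinations_with_advanced_optimization_enhanced
  by_cases hk : k < 0
  · rw [backtrack_neg arr k hk arr.length 0 [] (by omega)]
    unfold find_combinations_with_advanced_optimization_enhanced_alt
    rw [if_pos (Or.inl hk)]
  · have hk' : 0 ≤ k := by omega
    rw [backtrack_eq arr k hk' k.toNat 0 [] (by simp), alt_eq arr k hk']
    simp
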